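-- pv_equiv track=rewrite | github.com/XHermitOne/iq_framework | iq_report/report/rtf_report.py | findNextVar
-- ===== SOURCE A (Python) =====
-- def findNextVar(rep, pos=0):
--     """
--     Ищет следующую переменную.
--
--     :type rep: C{string}
--     :param rep: Шаблон.
--     :type pos: C{int}
--     :param pos: Позиция, с которой искать.
--     :rtype: C{tuple}
--     :return: Возвращает картеж. 1-й элемент начальная позиция текста замены;
--         2-й элемент конечная позиция; 3-й элемент - имя переменной.
--     """
--     p1 = rep.find('#', pos)
--
--     if p1 == -1:
--         return -1, -1, None
--
--     p2 = rep.find('#', p1+1)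
--
--     if p2 == -1:
--         return -1, -1, None
--
--     # --- Определяем имя переменной
--     var = rep[p1+1:p2]
--
--     # --- Выкидываем все лишнее
--
--     # Ищем конец группы
--     n2 = var.find('}')
--
--     if n2 > -1:
--         s = var[: n2]
--     else:
--         s = ''
--
--     n1 = 0
--
--     while 1:
--         n1 = var.find(' ', n1)
--
--         if n1 == -1:
--             s = var
--             break
--
--         # Ищем конец группы
--         n2 = var.find('}', n1+1)
--
--         if n2 == -1:
--             s += var[n1+1: p2]
--             break
--
--         s += var[n1+1: n2]
--         n1 = n2+1
--
--     s = s.replace('\r', '').replace('\n', '')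
--
--     if ' ' in s:
--         p1, p2, s = findNextVar(rep, p1+1)
--
--     return p1, p2, s
-- ===== SOURCE B (Python) =====
-- def _strip(s):
--     return ''.join(c for c in s if c not in '\r\n')
--
--
-- def _cleaned(var):
--     # No space at all: the variable name is taken verbatim.
--     if ' ' not in var:
--         return _strip(var)
--     pieces = []
--     first_brace = var.find('}')
--     pieces.append(var[:first_brace] if first_brace >= 0 else '')
--     n1 = 0
--     while True:
--         i = var.find(' ', n1)
--         if i < 0:
--             return _strip(var)
--         k = var.find('}', i + 1)
--         if k < 0:
--             pieces.append(var[i + 1:])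
--             return _strip(''.join(pieces))
--         pieces.append(var[i + 1:k])
--         n1 = k + 1
--
--
-- def findNextVar(rep, pos=0):
--     while True:
--         p1 = rep.find('#', pos)
--         if p1 < 0:
--             return -1, -1, None
--         p2 = rep.find('#', p1 + 1)
--         if p2 < 0:
--             return -1, -1, None
--         s = _cleaned(rep[p1 + 1:p2])
--         if ' ' not in s:
--             return p1, p2, s
--         pos = p1 + 1
-- ===== Notes on version B (the rewrite author's own statement) =====
-- stated objective: alternative
-- what changed: The tail-recursive retry becomes an explicit while-loop over pos; the cleaning is factored into a helper with a no-space fast path that collects slice pieces in a list joined once (instead of string +=), uses var[i+1:] in place of the accidental-but-equivalent rep-relative var[n1+1:p2] slice, and strips \r/\n by a single character filter instead of two replace passes.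
import Mathlib
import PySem

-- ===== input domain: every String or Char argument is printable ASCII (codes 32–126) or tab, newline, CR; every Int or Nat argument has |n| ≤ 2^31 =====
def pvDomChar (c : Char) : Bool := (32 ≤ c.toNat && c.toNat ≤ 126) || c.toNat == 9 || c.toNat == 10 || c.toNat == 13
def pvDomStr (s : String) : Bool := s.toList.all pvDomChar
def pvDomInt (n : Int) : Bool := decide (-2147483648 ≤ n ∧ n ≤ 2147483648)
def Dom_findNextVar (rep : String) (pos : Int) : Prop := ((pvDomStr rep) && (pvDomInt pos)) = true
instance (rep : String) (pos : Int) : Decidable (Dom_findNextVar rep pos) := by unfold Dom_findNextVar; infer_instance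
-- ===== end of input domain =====

-- B rewrites A's tail-recursive retry as an explicit loop over pos, factors the token cleaning
-- into a helper with a no-space fast path collecting slice pieces joined once, and strips \r/\n
-- by a single character filter instead of two replace passes (objective: alternative, same cost).
-- Loops are ported with a fuel parameter as a totality guard only; the fuel (length + 2) always
-- suffices because each retry strictly advances the scan position.

-- ===== PORT A =====
def pvCleanLoopA (var : List Char) (p2 : Int) : Nat → List Char → Int → List Char
  | 0, _s, _n1 => var
  | fuel + 1, s, n1 =>
    let i := PySem.Chars.findFrom var [' '] n1
    if i = -1 then var
    else
      let k := PySem.Chars.findFrom var ['}'] (i + 1)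
      if k = -1 then s ++ PySem.Chars.slice var (some (i + 1)) (some p2)
      else pvCleanLoopA var p2 fuel (s ++ PySem.Chars.slice var (some (i + 1)) (some k)) (k + 1)

def pvFindA (rep : List Char) : Nat → Int → Int × Int × Option (List Char)
  | 0, _pos => (-1, -1, none)
  | fuel + 1, pos =>
    let p1 := PySem.Chars.findFrom rep ['#'] pos
    if p1 = -1 then (-1, -1, none)
    else
      let p2 := PySem.Chars.findFrom rep ['#'] (p1 + 1)
      if p2 = -1 then (-1, -1, none)
      else
        let var := PySem.Chars.slice rep (some (p1 + 1)) (some p2)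
        let n2 := PySem.Chars.find var ['}']
        let s0 := if n2 > -1 then PySem.Chars.slice var none (some n2) else []
        let s1 := PySem.Chars.replace (PySem.Chars.replace (pvCleanLoopA var p2 (var.length + 2) s0 0) ['\r'] []) ['\n'] []
        if PySem.Chars.isIn [' '] s1 then pvFindA rep fuel (p1 + 1)
        else (p1, p2, some s1)

def findNextVar (rep : String) (pos : Int) : Int × Int × Option String :=
  match pvFindA rep.toList (rep.toList.length + 2) pos with
  | (p1, p2, s?) => (p1, p2, s?.map String.ofList)

-- ===== PORT B =====
def pvStripB (s : List Char) : List Char :=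
  PySem.Chars.join [] ((s.filter (fun c => !PySem.Chars.isIn [c] ['\r', '\n'])).map (fun c => [c]))

def pvCleanLoopB (var : List Char) : Nat → Int → List (List Char) → List Char
  | 0, _n1, _pieces => pvStripB var
  | fuel + 1, n1, pieces =>
    let i := PySem.Chars.findFrom var [' '] n1
    if i < 0 then pvStripB var
    else
      let k := PySem.Chars.findFrom var ['}'] (i + 1)
      if k < 0 then
        pvStripB (PySem.Chars.join [] (pieces ++ [PySem.Chars.slice var (some (i + 1)) none]))
      else pvCleanLoopB var fuel (k + 1) (pieces ++ [PySem.Chars.slice var (some (i + 1)) (some k)])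

def pvCleanB (var : List Char) : List Char :=
  if !PySem.Chars.isIn [' '] var then pvStripB var
  else
    let j := PySem.Chars.find var ['}']
    pvCleanLoopB var (var.length + 2) 0 [if 0 ≤ j then PySem.Chars.slice var none (some j) else []]

def pvFindB (rep : List Char) : Nat → Int → Int × Int × Option (List Char)
  | 0, _pos => (-1, -1, none)
  | fuel + 1, pos =>
    let p1 := PySem.Chars.findFrom rep ['#'] pos
    if p1 < 0 then (-1, -1, none)
    else
      let p2 := PySem.Chars.findFrom rep ['#'] (p1 + 1)
      if p2 < 0 then (-1, -1, none)
      else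
        let s := pvCleanB (PySem.Chars.slice rep (some (p1 + 1)) (some p2))
        if !PySem.Chars.isIn [' '] s then (p1, p2, some s)
        else pvFindB rep fuel (p1 + 1)

def findNextVar_alt (rep : String) (pos : Int) : Int × Int × Option String :=
  match pvFindB rep.toList (rep.toList.length + 2) pos with
  | (p1, p2, s?) => (p1, p2, s?.map String.ofList)

-- ===== PRECONDITION & SPEC =====
def Spec_findNextVar (rep : String) (pos : Int) (out : Int × Int × Option String) : Prop := out = findNextVar_alt rep pos
instance (rep : String) (pos : Int) (out : Int × Int × Option String) : Decidable (Spec_findNextVar rep pos out) := by unfold Spec_findNextVar; infer_instance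

-- ===== CLAIM (what is proved, stated in full; the proofs are below) =====
def Claim_equal_findNextVar : Prop := ∀ (rep : String) (pos : Int), Dom_findNextVar rep pos → Spec_findNextVar rep pos (findNextVar rep pos)

-- ===== LEMMAS AND PROOFS =====

theorem pvFindLt (l sub : List Char) (hsub : sub ≠ []) (hne : PySem.Chars.find l sub ≠ -1) :
    0 ≤ PySem.Chars.find l sub ∧ PySem.Chars.find l sub < l.length := by
  have hge : -1 ≤ PySem.Chars.find l sub := PySem.Chars.neg_one_le_find _ _
  have hfpos : 0 ≤ PySem.Chars.find l sub := by omega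
  have hspec := PySem.Chars.find_spec (s := l) (sub := sub) hfpos
  rcases hspec.1 with ⟨u, hu⟩
  have hne2 : (l.drop (PySem.Chars.find l sub).toNat) ≠ [] := by
    rw [← hu]; simp [List.append_eq_nil_iff, hsub]
  have := List.length_pos_iff.mpr hne2
  simp only [List.length_drop] at this
  omega

theorem pvFindFromSharp (s sub : List Char) (t : Int) (hsub : sub ≠ [])
    (h : PySem.Chars.findFrom s sub t none ≠ -1) :
    0 ≤ PySem.Chars.findFrom s sub t none ∧ PySem.Chars.findFrom s sub t none < s.length ∧
      (0 ≤ t → t ≤ PySem.Chars.findFrom s sub t none) := by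
  unfold PySem.Chars.findFrom at *
  simp only [Int.toNat_natCast, List.take_length] at h ⊢
  split_ifs at h ⊢ <;>
    first
      | omega
      | (rename_i hfind
         have hl := pvFindLt _ sub hsub hfind
         simp only [List.length_drop] at hl
         omega)

theorem pvFFltIff (s sub : List Char) (t : Int) (hsub : sub ≠ []) :
    (PySem.Chars.findFrom s sub t none < 0) ↔ PySem.Chars.findFrom s sub t none = -1 := by
  constructor
  · intro h; by_contra hne
    have := (pvFindFromSharp s sub t hsub hne).1; omega
  · intro h; omega

theorem pvJoinNil (l : List (List Char)) : PySem.Chars.join [] l = l.flatten := by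
  unfold PySem.Chars.join List.intercalate
  induction l with
  | nil => rfl
  | cons x xs ih =>
    cases xs with
    | nil => simp
    | cons y ys => simp_all [List.intersperse]

theorem pvJoinAppend (l : List (List Char)) (x : List Char) :
    PySem.Chars.join [] (l ++ [x]) = PySem.Chars.join [] l ++ x := by
  simp [pvJoinNil]

theorem pvReplaceGo (c : Char) (l : List Char) : ∀ (acc : List Char) (fuel : Nat), l.length ≤ fuel →
    PySem.Chars.replace.go [c] [] fuel l acc = acc.reverse ++ l.filter (fun x => !(x == c)) := by
  induction l with
  | nil =>
    intro acc fuel _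
    cases fuel <;> simp [PySem.Chars.replace.go]
  | cons hd tl ih =>
    intro acc fuel hlen
    cases fuel with
    | zero => simp at hlen
    | succ fuel =>
      by_cases hc : hd = c
      · subst hc
        simp [PySem.Chars.replace.go, List.isPrefixOf, ih acc fuel (by simpa using hlen)]
      · have : ([c].isPrefixOf (hd :: tl)) = false := by
          simp [List.isPrefixOf, Ne.symm hc]
        simp [PySem.Chars.replace.go, this, hc, ih (hd :: acc) fuel (by simpa using hlen)]

theorem pvReplaceSingle (s : List Char) (c : Char) :
    PySem.Chars.replace s [c] [] = s.filter (fun x => !(x == c)) := by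
  unfold PySem.Chars.replace
  simpa using pvReplaceGo c s [] s.length le_rfl

theorem pvIsInPair (c : Char) : PySem.Chars.isIn [c] ['\r', '\n'] = (c == '\r' || c == '\n') := by
  by_cases h1 : c = '\r'
  · subst h1; decide
  · by_cases h2 : c = '\n'
    · subst h2; decide
    · have hni : ¬ ([c] <:+: ['\r', '\n']) := by
        intro hinf
        have hc : c ∈ ['\r', '\n'] := hinf.mem (by simp)
        simp at hc; tauto
      simp [(PySem.Chars.isIn_eq_false_iff _ _).mpr hni, h1, h2]

theorem pvStripEq (cs : List Char) :
    pvStripB cs = PySem.Chars.replace (PySem.Chars.replace cs ['\r'] []) ['\n'] [] := by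
  unfold pvStripB
  rw [pvReplaceSingle, pvReplaceSingle, pvJoinNil]
  have A1 : ∀ (l : List Char), (List.map (fun c => [c]) l).flatten = l := by
    intro l; induction l <;> simp_all
  rw [A1, List.filter_filter]
  refine List.filter_congr ?_
  intro x _
  rw [pvIsInPair]
  cases hx : x == '\r' <;> cases hy : x == '\n' <;> simp

theorem pvSliceBig (xs : List Char) (a b : Int) (h0 : 0 ≤ a) (hb : (xs.length : Int) ≤ b) :
    PySem.Chars.slice xs (some a) (some b) = PySem.Chars.slice xs (some a) none := by
  have hb0 : 0 ≤ b := le_trans (by positivity) hb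
  rw [PySem.Chars.slice_eq_listSlice, PySem.Chars.slice_eq_listSlice,
      PySem.List.slice_toNat xs h0 hb0, PySem.List.slice_some_none]
  have ha : a = ((a.toNat : Nat) : Int) := (Int.toNat_of_nonneg h0).symm
  have hcl : PySem.List.clampIdx xs.length a = min a.toNat xs.length := by
    conv_lhs => rw [ha]
    rw [PySem.List.clampIdx_natCast]
  rw [hcl]
  by_cases hle : a.toNat ≤ xs.length
  · rw [min_eq_left hle, List.take_of_length_le (by simp [List.length_drop]; omega)]
  · rw [min_eq_right (by omega), List.take_of_length_le (by simp [List.length_drop]; omega),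
        List.drop_eq_nil_of_le (by omega), List.drop_eq_nil_of_le le_rfl]

theorem pvLoopAB (var : List Char) (p2 : Int) (h : (var.length : Int) ≤ p2) :
    ∀ (fuel : Nat) (n1 : Int) (pieces : List (List Char)),
      pvCleanLoopB var fuel n1 pieces =
        PySem.Chars.replace (PySem.Chars.replace (pvCleanLoopA var p2 fuel (PySem.Chars.join [] pieces) n1) ['\r'] []) ['\n'] [] := by
  intro fuel
  induction fuel with
  | zero => intro n1 pieces; exact pvStripEq var
  | succ fuel ih =>
    intro n1 pieces
    simp only [pvCleanLoopB, pvCleanLoopA]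
    by_cases hi : PySem.Chars.findFrom var [' '] n1 < 0
    · rw [if_pos hi, if_pos ((pvFFltIff var [' '] n1 (by simp)).mp hi)]
      exact pvStripEq var
    · rw [if_neg hi, if_neg (show ¬ PySem.Chars.findFrom var [' '] n1 = -1 by omega)]
      by_cases hk : PySem.Chars.findFrom var ['}'] (PySem.Chars.findFrom var [' '] n1 + 1) < 0
      · rw [if_pos hk, if_pos ((pvFFltIff var ['}'] _ (by simp)).mp hk)]
        rw [pvStripEq, pvJoinAppend, pvSliceBig var _ p2 (by
          have := (pvFindFromSharp var [' '] n1 (by simp) (by omega)).1; omega) h]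
      · rw [if_neg hk, if_neg (show ¬ PySem.Chars.findFrom var ['}'] (PySem.Chars.findFrom var [' '] n1 + 1) = -1 by omega)]
        rw [ih, pvJoinAppend]

theorem pvCleanEq (var : List Char) (p2 : Int) (h : (var.length : Int) ≤ p2) :
    pvCleanB var =
      PySem.Chars.replace (PySem.Chars.replace (pvCleanLoopA var p2 (var.length + 2)
        (if PySem.Chars.find var ['}'] > -1 then PySem.Chars.slice var none (some (PySem.Chars.find var ['}'])) else []) 0)
        ['\r'] []) ['\n'] [] := by
  unfold pvCleanB
  by_cases hsp : PySem.Chars.isIn [' '] var = true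
  · simp only [hsp, Bool.not_true, Bool.false_eq_true, if_false]
    rw [pvLoopAB var p2 h]
    have hjoin : ∀ x : List Char, PySem.Chars.join [] [x] = x := by
      intro x; rw [pvJoinNil]; simp
    rw [hjoin]
    have hif : (if 0 ≤ PySem.Chars.find var ['}'] then PySem.Chars.slice var none (some (PySem.Chars.find var ['}'])) else ([] : List Char))
        = (if PySem.Chars.find var ['}'] > -1 then PySem.Chars.slice var none (some (PySem.Chars.find var ['}'])) else []) := by
      by_cases h0 : 0 ≤ PySem.Chars.find var ['}']
      · rw [if_pos h0, if_pos (by omega)]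
      · rw [if_neg h0, if_neg (by omega)]
    rw [hif]
  · have hsp' : PySem.Chars.isIn [' '] var = false := by
      cases hb : PySem.Chars.isIn [' '] var
      · rfl
      · exact absurd hb hsp
    have hfind : PySem.Chars.find var [' '] = -1 := by
      unfold PySem.Chars.isIn at hsp'
      simpa using hsp'
    have hA : pvCleanLoopA var p2 (var.length + 2)
        (if PySem.Chars.find var ['}'] > -1 then PySem.Chars.slice var none (some (PySem.Chars.find var ['}'])) else []) 0 = var := by
      rw [show var.length + 2 = (var.length + 1) + 1 from rfl]
      simp only [pvCleanLoopA]
      rw [PySem.Chars.findFrom_zero, hfind]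
      simp
    rw [hA]
    simp only [hsp', Bool.not_false, if_true]
    exact pvStripEq var

theorem pvMain (rep : List Char) : ∀ (fuel : Nat) (pos : Int),
    pvFindA rep fuel pos = pvFindB rep fuel pos := by
  intro fuel
  induction fuel with
  | zero => intro pos; rfl
  | succ fuel ih =>
    intro pos
    simp only [pvFindA, pvFindB]
    by_cases hp1 : PySem.Chars.findFrom rep ['#'] pos < 0
    · rw [if_pos ((pvFFltIff rep ['#'] pos (by simp)).mp hp1), if_pos hp1]
    · rw [if_neg hp1, if_neg (show ¬ PySem.Chars.findFrom rep ['#'] pos = -1 by omega)]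
      by_cases hp2 : PySem.Chars.findFrom rep ['#'] (PySem.Chars.findFrom rep ['#'] pos + 1) < 0
      · rw [if_pos ((pvFFltIff rep ['#'] _ (by simp)).mp hp2), if_pos hp2]
      · rw [if_neg hp2, if_neg (show ¬ PySem.Chars.findFrom rep ['#'] (PySem.Chars.findFrom rep ['#'] pos + 1) = -1 by omega)]
        have hp2' : ¬ PySem.Chars.findFrom rep ['#'] (PySem.Chars.findFrom rep ['#'] pos + 1) = -1 := by omega
        have h0p2 := (pvFindFromSharp rep ['#'] (PySem.Chars.findFrom rep ['#'] pos + 1) (by simp) hp2').1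
        have hlen : ((PySem.Chars.slice rep (some (PySem.Chars.findFrom rep ['#'] pos + 1)) (some (PySem.Chars.findFrom rep ['#'] (PySem.Chars.findFrom rep ['#'] pos + 1)))).length : Int)
            ≤ PySem.Chars.findFrom rep ['#'] (PySem.Chars.findFrom rep ['#'] pos + 1) := by
          rw [PySem.Chars.slice_eq_listSlice, PySem.List.length_slice]
          have hc2 : PySem.List.clampIdx rep.length (PySem.Chars.findFrom rep ['#'] (PySem.Chars.findFrom rep ['#'] pos + 1))
              = min (PySem.Chars.findFrom rep ['#'] (PySem.Chars.findFrom rep ['#'] pos + 1)).toNat rep.length := by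
            conv_lhs => rw [show PySem.Chars.findFrom rep ['#'] (PySem.Chars.findFrom rep ['#'] pos + 1)
              = (((PySem.Chars.findFrom rep ['#'] (PySem.Chars.findFrom rep ['#'] pos + 1)).toNat : Nat) : Int) from (Int.toNat_of_nonneg h0p2).symm]
            rw [PySem.List.clampIdx_natCast]
          rw [hc2]
          omega
        rw [pvCleanEq _ _ hlen]
        by_cases hs : PySem.Chars.isIn [' ']
            (PySem.Chars.replace (PySem.Chars.replace (pvCleanLoopA
              (PySem.Chars.slice rep (some (PySem.Chars.findFrom rep ['#'] pos + 1)) (some (PySem.Chars.findFrom rep ['#'] (PySem.Chars.findFrom rep ['#'] pos + 1))))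
              (PySem.Chars.findFrom rep ['#'] (PySem.Chars.findFrom rep ['#'] pos + 1))
              ((PySem.Chars.slice rep (some (PySem.Chars.findFrom rep ['#'] pos + 1)) (some (PySem.Chars.findFrom rep ['#'] (PySem.Chars.findFrom rep ['#'] pos + 1)))).length + 2)
              (if PySem.Chars.find (PySem.Chars.slice rep (some (PySem.Chars.findFrom rep ['#'] pos + 1)) (some (PySem.Chars.findFrom rep ['#'] (PySem.Chars.findFrom rep ['#'] pos + 1)))) ['}'] > -1
               then PySem.Chars.slice (PySem.Chars.slice rep (some (PySem.Chars.findFrom rep ['#'] pos + 1)) (some (PySem.Chars.findFrom rep ['#'] (PySem.Chars.findFrom rep ['#'] pos + 1)))) none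
                 (some (PySem.Chars.find (PySem.Chars.slice rep (some (PySem.Chars.findFrom rep ['#'] pos + 1)) (some (PySem.Chars.findFrom rep ['#'] (PySem.Chars.findFrom rep ['#'] pos + 1)))) ['}']))
               else []) 0) ['\r'] []) ['\n'] []) = true
        · simp only [hs, Bool.not_true, Bool.false_eq_true, if_false, if_true]
          exact ih (PySem.Chars.findFrom rep ['#'] pos + 1)
        · simp only [Bool.not_eq_true] at hs
          simp only [hs, Bool.not_false, Bool.false_eq_true, if_false, if_true]

-- ===== VERDICT (by name: the statement is the Claim_ definition above) =====
theorem findNextVar_spec : Claim_equal_findNextVar := by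
  intro rep pos _
  unfold Spec_findNextVar findNextVar findNextVar_alt
  rw [pvMain]
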